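-- pv_equiv track=rewrite | github.com/veeceey/CodeSignalCodeVueHackerRank | AMZOA_FindPairWithGivenSum.py | findsongspair
-- ===== SOURCE A (Python) =====
-- def findsongspair(array, d):
--     target=d-30
--     ans = []
--     for i in range(len(array) - 1):
--         for j in range(i + 1, len(array)):
--             if array[i] + array[j] < target:
--                 ans = [array[i], array[j]]
--     return ans
-- ===== SOURCE B (Python) =====
-- def findsongspair(array, d):
--     # O(n) backward scan with a running suffix minimum; A is the O(n^2) double loop.
--     target = d - 30
--     n = len(array)
--     m = None  # min of array[i+1:]
--     for i in range(n - 2, -1, -1):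
--         x = array[i + 1]
--         m = x if m is None else min(m, x)
--         if array[i] + m < target:
--             for j in range(n - 1, i, -1):
--                 if array[i] + array[j] < target:
--                     return [array[i], array[j]]
--     return []
-- ===== Notes on version B (the rewrite author's own statement) =====
-- stated objective: faster
-- what changed: Replaces the O(n^2) double loop (which keeps overwriting ans with the lexicographically last qualifying pair) by a single backward scan maintaining a running suffix minimum to find the largest valid first index, then one backward scan for the largest matching second index.
import Mathlib
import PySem

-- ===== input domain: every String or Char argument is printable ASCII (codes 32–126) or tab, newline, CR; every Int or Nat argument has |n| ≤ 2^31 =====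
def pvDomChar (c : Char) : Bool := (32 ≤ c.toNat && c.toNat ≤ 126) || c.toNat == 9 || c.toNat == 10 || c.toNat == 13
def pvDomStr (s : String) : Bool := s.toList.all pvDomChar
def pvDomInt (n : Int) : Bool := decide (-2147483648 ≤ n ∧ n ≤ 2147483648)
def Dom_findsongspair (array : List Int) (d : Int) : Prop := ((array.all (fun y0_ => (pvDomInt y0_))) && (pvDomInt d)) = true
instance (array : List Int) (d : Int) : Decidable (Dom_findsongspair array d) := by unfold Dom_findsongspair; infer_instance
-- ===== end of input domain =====

-- B replaces A's O(n^2) double loop by a backward scan with a running suffix minimum (two O(n) scans).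

-- ===== PORT A =====
def findsongspair (array : List Int) (d : Int) : List Int :=
  let target := d - 30
  (PySem.List.pyRange 0 (PySem.List.len array - 1) 1).foldl (fun ans i =>
    (PySem.List.pyRange (i + 1) (PySem.List.len array) 1).foldl (fun ans j =>
      if PySem.List.pyGetD array i 0 + PySem.List.pyGetD array j 0 < target then
        [PySem.List.pyGetD array i 0, PySem.List.pyGetD array j 0]
      else ans) ans) []

-- ===== PORT B =====
-- inner backward scan of Source B: j = i+f, i+f-1, ..., i+1 (fuel f counts remaining j's)
def altJ (a : List Int) (t : Int) (i : Nat) : Nat → List Int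
  | 0 => []
  | f + 1 =>
      if a.getD i 0 + a.getD (i + 1 + f) 0 < t then
        [a.getD i 0, a.getD (i + 1 + f) 0]
      else altJ a t i f

-- outer backward scan of Source B: fuel = i+1 means current index i; m = min of a[i+2:] (none if empty)
def altI (a : List Int) (t : Int) : Nat → Option Int → List Int
  | 0, _ => []
  | i + 1, m =>
      let x := a.getD (i + 1) 0
      let m' := match m with | none => x | some v => min v x
      if a.getD i 0 + m' < t then altJ a t i (a.length - 1 - i)
      else altI a t i (some m')

def findsongspair_alt (array : List Int) (d : Int) : List Int :=
  altI array (d - 30) (array.length - 1) none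

-- ===== PRECONDITION & SPEC =====
def Spec_findsongspair (array : List Int) (d : Int) (out : List Int) : Prop := out = findsongspair_alt array d
instance (array : List Int) (d : Int) (out : List Int) : Decidable (Spec_findsongspair array d out) := by unfold Spec_findsongspair; infer_instance

-- ===== CLAIM (what is proved, stated in full; the proofs are below) =====
def Claim_equal_findsongspair : Prop := ∀ (array : List Int) (d : Int), Dom_findsongspair array d → Spec_findsongspair array d (findsongspair array d)

-- ===== LEMMAS AND PROOFS =====

-- the running suffix minimum of Source B: combine the incoming Option minimum with the new element
def pvMix (x : Int) : Option Int → Int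
  | none => x
  | some v => min v x

-- canonical answer after considering first indices i < k (in increasing i; later i overrides)
def pvH (a : List Int) (t : Int) : Nat → List Int
  | 0 => []
  | k + 1 =>
      if altJ a t k (a.length - 1 - k) = [] then pvH a t k
      else altJ a t k (a.length - 1 - k)

theorem pv_inner (a : List Int) (t : Int) (i : Nat) :
    ∀ (f : Nat) (ans : List Int),
      (PySem.List.pyRange ((i : Int) + 1) ((i : Int) + 1 + f) 1).foldl (fun ans j =>
        if PySem.List.pyGetD a i 0 + PySem.List.pyGetD a j 0 < t then
          [PySem.List.pyGetD a i 0, PySem.List.pyGetD a j 0]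
        else ans) ans
      = if altJ a t i f = [] then ans else altJ a t i f := by
  intro f
  induction f with
  | zero =>
      intro ans
      rw [PySem.List.pyRange_one_eq_nil (by omega)]
      simp [altJ]
  | succ f ih =>
      intro ans
      have hsplit : PySem.List.pyRange ((i : Int) + 1) ((i : Int) + 1 + (f + 1 : Nat)) 1
          = PySem.List.pyRange ((i : Int) + 1) ((i : Int) + 1 + (f : Nat)) 1 ++ [(i : Int) + 1 + (f : Nat)] := by
        have hc : ((i : Int) + 1 + ((f + 1 : Nat) : Int)) = ((i : Int) + 1 + (f : Nat)) + 1 := by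
          push_cast; ring
        rw [hc, PySem.List.pyRange_one_succ_right (by omega)]
      rw [hsplit, List.foldl_append, ih ans]
      have hcast : ((i : Int) + 1 + (f : Nat)) = ((i + 1 + f : Nat) : Int) := by push_cast; ring
      have hJ : altJ a t i (f + 1)
          = if a.getD i 0 + a.getD (i + 1 + f) 0 < t then
              [a.getD i 0, a.getD (i + 1 + f) 0]
            else altJ a t i f := rfl
      rw [hJ]
      simp only [List.foldl_cons, List.foldl_nil, hcast, PySem.List.pyGetD_natCast,
        List.getD_eq_getElem?_getD]
      by_cases h : a[i]?.getD 0 + a[i + 1 + f]?.getD 0 < t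
      · simp [h]
      · simp [h]

theorem pv_outer (a : List Int) (t : Int) :
    ∀ (k : Nat), k ≤ a.length - 1 →
      (PySem.List.pyRange 0 (k : Int) 1).foldl (fun ans i =>
        (PySem.List.pyRange (i + 1) (PySem.List.len a) 1).foldl (fun ans j =>
          if PySem.List.pyGetD a i 0 + PySem.List.pyGetD a j 0 < t then
            [PySem.List.pyGetD a i 0, PySem.List.pyGetD a j 0]
          else ans) ans) []
      = pvH a t k := by
  intro k
  induction k with
  | zero =>
      intro _
      rw [PySem.List.pyRange_one_eq_nil (by omega)]
      simp [pvH]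
  | succ k ih =>
      intro hk
      have hsplit : PySem.List.pyRange 0 ((k + 1 : Nat) : Int) 1
          = PySem.List.pyRange 0 (k : Int) 1 ++ [(k : Int)] := by
        have hc : (((k + 1 : Nat)) : Int) = ((k : Int)) + 1 := by push_cast; ring
        rw [hc, PySem.List.pyRange_one_succ_right (by omega)]
      rw [hsplit, List.foldl_append, ih (by omega)]
      simp only [List.foldl_cons, List.foldl_nil]
      have hlen : PySem.List.len a = (a.length : Int) := PySem.List.len_eq a
      have hup : ((k : Int) + 1 + ((a.length - 1 - k : Nat) : Int)) = PySem.List.len a := by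
        rw [hlen]; omega
      rw [← hup]
      rw [pv_inner a t k (a.length - 1 - k)]
      rfl

theorem pv_altJ_nil (a : List Int) (t : Int) (i : Nat) :
    ∀ f : Nat, (altJ a t i f = [] ↔ ∀ k, k < f → ¬ (a.getD i 0 + a.getD (i + 1 + k) 0 < t)) := by
  intro f
  induction f with
  | zero => simp [altJ]
  | succ f ih =>
      rw [altJ]
      by_cases h : a.getD i 0 + a.getD (i + 1 + f) 0 < t
      · rw [if_pos h]
        constructor
        · intro hcontr; exact absurd hcontr (by simp)
        · intro hall; exact absurd h (hall f (by omega))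
      · rw [if_neg h, ih]
        constructor
        · intro hall k hk
          by_cases hkf : k < f
          · exact hall k hkf
          · have hkeq : k = f := by omega
            subst hkeq; exact h
        · intro hall k hk; exact hall k (by omega)

theorem pv_altI_eq (a : List Int) (t : Int) :
    ∀ (fuel : Nat) (m : Option Int), fuel ≤ a.length - 1 →
      (m = none → a.length ≤ fuel + 1) →
      (∀ v, m = some v →
        (∃ k, fuel + 1 ≤ k ∧ k < a.length ∧ v = a.getD k 0) ∧
        (∀ k, fuel + 1 ≤ k → k < a.length → v ≤ a.getD k 0)) →
      altI a t fuel m = pvH a t fuel := by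
  intro fuel
  induction fuel with
  | zero => intro m _ _ _; rfl
  | succ i ih =>
      intro m hfu hnone hsome
      have hunf : altI a t (i + 1) m =
          (if a.getD i 0 + pvMix (a.getD (i + 1) 0) m < t then
            altJ a t i (a.length - 1 - i)
          else altI a t i (some (pvMix (a.getD (i + 1) 0) m))) := by
        cases m <;> rfl
      rw [hunf]
      set x := a.getD (i + 1) 0 with hx
      set m' := pvMix x m with hm'
      have hlen : i + 2 ≤ a.length := by omega
      -- m' is the minimum of a.getD over [i+1, a.length)
      have hmem : ∃ k, i + 1 ≤ k ∧ k < a.length ∧ m' = a.getD k 0 := by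
        cases m with
        | none =>
            refine ⟨i + 1, by omega, by omega, ?_⟩
            show x = a.getD (i + 1) 0
            exact hx
        | some v =>
            obtain ⟨⟨k, hk1, hk2, hk3⟩, _⟩ := hsome v rfl
            by_cases hvx : v ≤ x
            · refine ⟨k, by omega, hk2, ?_⟩
              show min v x = a.getD k 0
              rw [min_eq_left hvx, hk3]
            · refine ⟨i + 1, by omega, by omega, ?_⟩
              show min v x = a.getD (i + 1) 0
              rw [min_eq_right (not_le.mp hvx).le, hx]
      have hle : ∀ k, i + 1 ≤ k → k < a.length → m' ≤ a.getD k 0 := by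
        intro k hk1 hk2
        cases m with
        | none =>
            have hk : k = i + 1 := by have := hnone rfl; omega
            subst hk
            show x ≤ a.getD (i + 1) 0
            rw [← hx]
        | some v =>
            obtain ⟨_, hall⟩ := hsome v rfl
            by_cases hk : k = i + 1
            · subst hk
              show min v x ≤ a.getD (i + 1) 0
              rw [← hx]; exact min_le_right v x
            · have hvk := hall k (by omega) hk2
              calc m' ≤ v := min_le_left v x
                _ ≤ a.getD k 0 := hvk
      have hguard : (a.getD i 0 + m' < t) ↔ ∃ k, i + 1 ≤ k ∧ k < a.length ∧ a.getD i 0 + a.getD k 0 < t := by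
        constructor
        · intro hg
          obtain ⟨k, hk1, hk2, hk3⟩ := hmem
          exact ⟨k, hk1, hk2, by omega⟩
        · rintro ⟨k, hk1, hk2, hk3⟩
          have := hle k hk1 hk2
          omega
      have hJ : altJ a t i (a.length - 1 - i) = [] ↔
          ¬ ∃ k, i + 1 ≤ k ∧ k < a.length ∧ a.getD i 0 + a.getD k 0 < t := by
        rw [pv_altJ_nil]
        constructor
        · intro hall ⟨k, hk1, hk2, hk3⟩
          exact hall (k - (i + 1)) (by omega) (by
            have : i + 1 + (k - (i + 1)) = k := by omega
            rw [this]; exact hk3)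
        · intro hno k hk hcontr
          exact hno ⟨i + 1 + k, by omega, by omega, hcontr⟩
      by_cases hg : a.getD i 0 + m' < t
      · rw [if_pos hg]
        have : ¬ altJ a t i (a.length - 1 - i) = [] := by
          rw [hJ]; exact not_not_intro (hguard.mp hg)
        have hpvH : pvH a t (i + 1)
            = if altJ a t i (a.length - 1 - i) = [] then pvH a t i
              else altJ a t i (a.length - 1 - i) := rfl
        rw [hpvH, if_neg this]
      · rw [if_neg hg]
        have hJnil : altJ a t i (a.length - 1 - i) = [] := by
          rw [hJ]; intro hc; exact hg (hguard.mpr hc)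
        have hpvH : pvH a t (i + 1)
            = if altJ a t i (a.length - 1 - i) = [] then pvH a t i
              else altJ a t i (a.length - 1 - i) := rfl
        rw [hpvH, if_pos hJnil]
        apply ih (some m') (by omega) (by intro h; cases h)
        intro v hv
        cases hv
        exact ⟨hmem, hle⟩

-- ===== VERDICT (by name: the statement is the Claim_ definition above) =====
theorem findsongspair_spec : Claim_equal_findsongspair := by
  intro array d _
  show findsongspair array d = findsongspair_alt array d
  unfold findsongspair findsongspair_alt
  cases array with
  | nil => rfl
  | cons y ys =>
      have hn : 1 ≤ (y :: ys).length := by simp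
      have hcast : PySem.List.len (y :: ys) - 1 = (((y :: ys).length - 1 : Nat) : Int) := by
        rw [PySem.List.len_eq]; omega
      rw [hcast, pv_outer (y :: ys) (d - 30) ((y :: ys).length - 1) (le_refl _)]
      rw [pv_altI_eq (y :: ys) (d - 30) ((y :: ys).length - 1) none (le_refl _)
        (fun _ => by omega) (fun v hv => by cases hv)]
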